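-- pv_equiv track=rewrite | github.com/dgullis/advent_of_code | 2023/day09/day09_part2.py | get_last_numbers_first_row
-- ===== SOURCE A (Python) =====
-- def get_last_numbers_first_row(pyramid):
--     numbers = []
--     for row in reversed(list(enumerate(pyramid[:-1]))):
--         if not numbers:
--             numbers.append(row[0])
--         else:
--             numbers.append(row[0]-numbers[-1])
--     return numbers[-1]
-- ===== SOURCE B (Python) =====
-- def get_last_numbers_first_row(pyramid):
--     # The loop's result depends only on len(pyramid): it is the alternating
--     # sum 0-1+2-...+/-(m-1) with m = len(pyramid)-1, which has a closed form.
--     m = len(pyramid) - 1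
--     if m % 2 == 1:
--         return (m - 1) // 2
--     return -(m // 2)
-- ===== Notes on version B (the rewrite author's own statement) =====
-- stated objective: faster
-- what changed: Replaced A's backward loop that builds the whole alternating-difference list with the O(1) closed form of the alternating index sum, which depends only on len(pyramid).
-- outside the precondition, e.g. on get_last_numbers_first_row([7]): A raises IndexError, B returns 0; on get_last_numbers_first_row([]): A raises IndexError, B returns -1
import Mathlib
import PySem

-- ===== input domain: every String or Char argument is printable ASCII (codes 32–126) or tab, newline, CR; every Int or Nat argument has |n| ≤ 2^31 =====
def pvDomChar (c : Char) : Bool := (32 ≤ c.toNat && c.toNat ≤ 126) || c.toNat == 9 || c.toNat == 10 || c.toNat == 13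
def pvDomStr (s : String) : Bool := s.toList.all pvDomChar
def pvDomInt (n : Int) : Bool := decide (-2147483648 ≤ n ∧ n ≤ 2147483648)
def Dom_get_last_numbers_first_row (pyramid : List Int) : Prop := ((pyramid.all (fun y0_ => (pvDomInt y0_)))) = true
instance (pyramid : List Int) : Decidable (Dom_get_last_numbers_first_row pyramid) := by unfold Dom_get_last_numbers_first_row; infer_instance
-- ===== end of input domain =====

-- B replaces A's O(n) backward loop over the pyramid by the O(1) closed form of the
-- alternating index sum, which depends only on len(pyramid).

-- ===== PORT A =====
-- loop body of A (append the index, or the index minus the last element)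
def pvStepA (numbers : List Int) (row : Int × Int) : List Int :=
  if numbers.isEmpty then numbers ++ [row.1]
  else numbers ++ [row.1 - PySem.List.pyGetD numbers (-1) 0]

def get_last_numbers_first_row (pyramid : List Int) : Int :=
  let numbers : List Int :=
    ((PySem.List.enumerate (PySem.List.slice pyramid none (some (-1)))).reverse).foldl
      pvStepA []
  PySem.List.pyGetD numbers (-1) 0   -- numbers[-1]; empty only outside Pre_

-- ===== PORT B =====
def get_last_numbers_first_row_alt (pyramid : List Int) : Int :=
  let m : Int := (pyramid.length : Int) - 1
  if PySem.Int.mod m 2 = 1 then PySem.Int.floordiv (m - 1) 2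
  else -(PySem.Int.floordiv m 2)

-- ===== PRECONDITION & SPEC =====
-- Pre_ excludes pyramids of length < 2, on which A's final index into the still-empty numbers list raises IndexError
def Pre_get_last_numbers_first_row (pyramid : List Int) : Prop := 2 ≤ pyramid.length
instance (pyramid : List Int) : Decidable (Pre_get_last_numbers_first_row pyramid) := by
  unfold Pre_get_last_numbers_first_row; infer_instance
def pvWitness_get_last_numbers_first_row : List Int := [3, 1, 4]

def Spec_get_last_numbers_first_row (pyramid : List Int) (out : Int) : Prop := out = get_last_numbers_first_row_alt pyramid
instance (pyramid : List Int) (out : Int) : Decidable (Spec_get_last_numbers_first_row pyramid out) := by unfold Spec_get_last_numbers_first_row; infer_instance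

-- ===== CLAIM (what is proved, stated in full; the proofs are below) =====
def Claim_equal_get_last_numbers_first_row : Prop := ∀ (pyramid : List Int), Dom_get_last_numbers_first_row pyramid → Pre_get_last_numbers_first_row pyramid → Spec_get_last_numbers_first_row pyramid (get_last_numbers_first_row pyramid)

-- ===== LEMMAS AND PROOFS =====

-- abstract value of A's loop: pvR j v folds indices j-1, j-2, …, 0 onto last value v
def pvR : Nat → Int → Int
  | 0, v => v
  | j + 1, v => pvR j ((j : Int) - v)

theorem pvStepA_ne_nil (acc : List Int) (row : Int × Int) (h : acc ≠ []) :
    pvStepA acc row = acc ++ [row.1 - PySem.List.pyGetD acc (-1) 0] := by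
  simp [pvStepA, List.isEmpty_iff, h]

theorem pvLoop_last (xs : List Int) : ∀ (acc : List Int), acc ≠ [] →
    PySem.List.pyGetD (((PySem.List.enumerate xs).reverse).foldl pvStepA acc) (-1) 0
      = pvR xs.length (PySem.List.pyGetD acc (-1) 0) := by
  induction xs using List.reverseRecOn with
  | nil => intro acc _; simp [PySem.List.enumerate, pvR]
  | append_singleton ys y ih =>
      intro acc hacc
      have he : PySem.List.enumerate (ys ++ [y])
          = PySem.List.enumerate ys ++ [((ys.length : Int), y)] := by
        simpa using PySem.List.enumerate_append (xs := ys) (ys := [y]) (s := 0)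
      rw [he, List.reverse_append, List.reverse_singleton, List.singleton_append,
        List.foldl_cons, pvStepA_ne_nil _ _ hacc]
      rw [ih (acc ++ [(ys.length : Int) - PySem.List.pyGetD acc (-1) 0]) (by simp)]
      simp [PySem.List.pyGetD_neg_one_append_singleton, pvR]

theorem pvR_closed : ∀ (j : Nat) (v : Int),
    pvR j v = if j % 2 = 0 then v - ((j / 2 : Nat) : Int) else ((j / 2 : Nat) : Int) - v := by
  intro j
  induction j with
  | zero => intro v; simp [pvR]
  | succ j ih =>
      intro v
      rw [pvR, ih]
      by_cases h2 : j % 2 = 0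
      · rw [if_pos h2, if_neg (show ¬ (j + 1) % 2 = 0 by omega)]
        omega
      · rw [if_neg h2, if_pos (show (j + 1) % 2 = 0 by omega)]
        omega

theorem get_last_numbers_first_row_eq_pvR (pyramid : List Int)
    (h : 2 ≤ pyramid.length) :
    get_last_numbers_first_row pyramid
      = pvR (pyramid.length - 2) ((pyramid.length : Int) - 2) := by
  unfold get_last_numbers_first_row
  rw [PySem.List.slice_to_neg_one]
  have hd : pyramid.dropLast ≠ [] := by
    intro hnil
    have := congrArg List.length hnil
    simp [List.length_dropLast] at this
    omega
  obtain h0 | ⟨ys, y, hys⟩ := List.eq_nil_or_concat pyramid.dropLast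
  · exact absurd h0 hd
  rw [List.concat_eq_append] at hys
  have hlen : ys.length = pyramid.length - 2 := by
    have h1 := congrArg List.length hys
    simp [List.length_dropLast] at h1
    omega
  rw [hys]
  have he : PySem.List.enumerate (ys ++ [y])
      = PySem.List.enumerate ys ++ [((ys.length : Int), y)] := by
    simpa using PySem.List.enumerate_append (xs := ys) (ys := [y]) (s := 0)
  rw [he, List.reverse_append, List.reverse_singleton, List.singleton_append,
    List.foldl_cons]
  have hstep : pvStepA [] ((ys.length : Int), y) = [((ys.length : Int))] := by
    simp [pvStepA]
  rw [hstep, pvLoop_last ys [((ys.length : Int))] (by simp)]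
  have : PySem.List.pyGetD [((ys.length : Int))] (-1) 0 = (ys.length : Int) := by
    simpa using PySem.List.pyGetD_neg_one_append_singleton (xs := ([] : List Int))
      (x := ((ys.length : Int))) (d := 0)
  rw [this, hlen]
  congr 1
  omega

-- ===== VERDICT (by name: the statement is the Claim_ definition above) =====
theorem get_last_numbers_first_row_spec : Claim_equal_get_last_numbers_first_row := by
  intro pyramid _ hpre
  unfold Spec_get_last_numbers_first_row
  have h2 : 2 ≤ pyramid.length := hpre
  rw [get_last_numbers_first_row_eq_pvR pyramid h2, pvR_closed]
  unfold get_last_numbers_first_row_alt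
  set n := pyramid.length with hn
  have hm2 : PySem.Int.mod ((n : Int) - 1) 2 = ((n : Int) - 1) % 2 :=
    PySem.Int.mod_eq_emod_of_pos (by omega)
  have hf1 : PySem.Int.floordiv ((n : Int) - 1 - 1) 2 = ((n : Int) - 2) / 2 := by
    rw [PySem.Int.floordiv_eq_ediv_of_pos (by omega)]; ring_nf
  have hf2 : PySem.Int.floordiv ((n : Int) - 1) 2 = ((n : Int) - 1) / 2 :=
    PySem.Int.floordiv_eq_ediv_of_pos (by omega)
  rcases Nat.even_or_odd n with h | h
  · -- n even: (n-2) % 2 = 0, (n-1) % 2 = 1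
    have he : n % 2 = 0 := Nat.even_iff.mp h
    have hmod : (n - 2) % 2 = 0 := by omega
    rw [if_pos hmod, if_pos (by rw [hm2]; omega), hf1]
    have : ((n - 2) / 2 : Nat) = (((n : Int) - 2) / 2).toNat := by omega
    rw [this]
    omega
  · have ho : n % 2 = 1 := Nat.odd_iff.mp h
    have hmod : ¬ (n - 2) % 2 = 0 := by omega
    rw [if_neg hmod, if_neg (by rw [hm2]; omega), hf2]
    have : ((n - 2) / 2 : Nat) = (((n : Int) - 2) / 2).toNat := by omega
    rw [this]
    omega
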